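-- pv_equiv track=rewrite | github.com/balanalina/Formal-Languages-and-Compiler-Design | Scanner/Scanner/Scanner.py | find_constant
-- ===== SOURCE A (Python) =====
-- def find_constant(tokens, token):
--     start_index = token.find('"')
--     const = token[start_index:]
--     index = tokens.index(token) + 1
--     while index < len(tokens):
--         if tokens[index].find('"') != -1:
--             substr_index = tokens[index].find('"')
--             const += " "+tokens[index][0:substr_index+1]
--             return const, index
--         else:
--             const += " "+tokens[index]
--         index+=1
--     return "error",index
-- ===== SOURCE B (Python) =====
-- def find_constant(tokens, token):
--     start = tokens.index(token) + 1
--     blob = ' '.join(tokens[start:])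
--     pos = blob.find('"')
--     if pos == -1:
--         return "error", len(tokens)
--     # recover the index of the token holding that quote from cumulative lengths
--     j, acc = start, 0
--     while acc + len(tokens[j]) <= pos:
--         acc += len(tokens[j]) + 1
--         j += 1
--     return token[token.find('"'):] + ' ' + blob[:pos + 1], j
-- ===== Notes on version B (the rewrite author's own statement) =====
-- stated objective: alternative
-- what changed: B flattens tokens[start:] into one space-joined string, finds the first quote character in that single string, takes one slice for the constant, and recovers the closing token's index arithmetically from cumulative token lengths, instead of A's token-by-token while loop that tests each token for a quote and accumulates the string incrementally.
import Mathlib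
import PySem

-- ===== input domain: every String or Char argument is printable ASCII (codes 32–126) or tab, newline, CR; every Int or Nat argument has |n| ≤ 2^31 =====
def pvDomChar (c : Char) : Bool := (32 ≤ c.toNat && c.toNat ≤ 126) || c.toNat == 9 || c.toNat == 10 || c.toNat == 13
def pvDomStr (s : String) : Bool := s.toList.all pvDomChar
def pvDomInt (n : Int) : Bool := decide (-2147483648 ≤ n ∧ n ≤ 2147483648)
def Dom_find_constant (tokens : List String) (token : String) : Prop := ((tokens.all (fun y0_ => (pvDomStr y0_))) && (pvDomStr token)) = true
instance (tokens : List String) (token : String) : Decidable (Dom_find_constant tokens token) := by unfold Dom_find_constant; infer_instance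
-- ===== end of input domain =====

-- B joins the tail tokens into one string, finds the first quote CHARACTER there, slices once,
-- and recovers the closing token's index from cumulative token lengths — instead of A's
-- token-by-token loop that tests each token for a quote and accumulates the string. Same cost.
-- Return value only; neither mutates its arguments.

-- ===== PORT A =====
def fcLoopA (tokens : List String) (const : String) (index : Nat) : String × Int :=
  if h : index < tokens.length then
    if PySem.Str.find tokens[index] "\"" ≠ -1 then
      (const ++ " " ++ PySem.Str.slice tokens[index] (some 0) (some (PySem.Str.find tokens[index] "\"" + 1)), (index : Int))
    else
      fcLoopA tokens (const ++ " " ++ tokens[index]) (index + 1)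
  else ("error", (index : Int))
termination_by tokens.length - index
decreasing_by omega

def find_constant (tokens : List String) (token : String) : String × Int :=
  let start_index := PySem.Str.find token "\""
  let const := PySem.Str.slice token (some start_index) none
  match PySem.List.index? tokens token with
  | none => ("error", 0)  -- Python raises ValueError here; excluded by Pre_
  | some i => fcLoopA tokens const (i + 1)

-- ===== PORT B =====
-- port of B's index-recovery loop 'while acc + len(tokens[j]) <= pos: ...';
-- the 'j < tokens.length' test only makes the recursion total — whenever pos is a valid index
-- of the joined string (the only way the loop is reached), Python's loop stops inside the list
def fcLocB (tokens : List String) (pos : Int) (j : Nat) (acc : Int) : Int :=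
  if h : j < tokens.length then
    if acc + PySem.Str.len tokens[j] ≤ pos then
      fcLocB tokens pos (j + 1) (acc + PySem.Str.len tokens[j] + 1)
    else (j : Int)
  else (j : Int)
termination_by tokens.length - j
decreasing_by omega

def find_constant_alt (tokens : List String) (token : String) : String × Int :=
  match PySem.List.index? tokens token with
  | none => ("error", 0)  -- Python raises ValueError here; excluded by Pre_
  | some i =>
    let start := i + 1
    let blob := PySem.Str.join " " (PySem.List.slice tokens (some (start : Int)) none)
    let pos := PySem.Str.find blob "\""
    if pos = -1 then ("error", (tokens.length : Int))
    else
      (PySem.Str.slice token (some (PySem.Str.find token "\"")) none ++ " " ++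
         PySem.Str.slice blob (some 0) (some (pos + 1)),
       fcLocB tokens pos start 0)

-- ===== PRECONDITION & SPEC =====
-- Pre_: both Pythons raise ValueError (tokens.index) when token is not in tokens.
def Pre_find_constant (tokens : List String) (token : String) : Prop := token ∈ tokens
instance (tokens : List String) (token : String) : Decidable (Pre_find_constant tokens token) := by unfold Pre_find_constant; infer_instance
def pvWitness_find_constant : List String × String := (["a", "\"x\""], "a")

def Spec_find_constant (tokens : List String) (token : String) (out : String × Int) : Prop := out = find_constant_alt tokens token
instance (tokens : List String) (token : String) (out : String × Int) : Decidable (Spec_find_constant tokens token out) := by unfold Spec_find_constant; infer_instance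

-- ===== CLAIM (what is proved, stated in full; the proofs are below) =====
def Claim_equal_find_constant : Prop := ∀ (tokens : List String) (token : String), Dom_find_constant tokens token → Pre_find_constant tokens token → Spec_find_constant tokens token (find_constant tokens token)

-- ===== LEMMAS AND PROOFS =====

-- list-structural version of A's while loop (proof helper)
def fcAux (rest : List String) (const : String) (i : Nat) : String × Int :=
  match rest with
  | [] => ("error", (i : Int))
  | t :: r =>
    if PySem.Str.find t "\"" ≠ -1 then
      (const ++ " " ++ PySem.Str.slice t (some 0) (some (PySem.Str.find t "\"" + 1)), (i : Int))
    else
      fcAux r (const ++ " " ++ t) (i + 1)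

-- the middle tokens, each preceded by one space (proof helper)
def midConcat : List String → String
  | [] => ""
  | t :: r => " " ++ t ++ midConcat r

-- first tail index whose token contains a quote (proof helper for both ports)
def fcScanB (rest : List String) (j : Nat) : Option (Nat × String × Int) :=
  match rest with
  | [] => none
  | t :: r =>
    let q := PySem.Str.find t "\""
    if q ≠ -1 then some (j, t, q) else fcScanB r (j + 1)

-- total length of the tokens, one separator each (proof helper)
def fcSizes (l : List String) : Nat := (l.map (fun s => s.toList.length + 1)).sum

theorem fcSizes_nil : fcSizes [] = 0 := rfl

theorem fcSizes_cons (u : String) (l : List String) :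
    fcSizes (u :: l) = u.toList.length + 1 + fcSizes l := by
  simp only [fcSizes, List.map_cons, List.sum_cons]


theorem fcLoopA_eq_aux (tokens : List String) : ∀ (index : Nat) (const : String),
    fcLoopA tokens const index = fcAux (tokens.drop index) const index := by
  intro index
  induction' hfuel : tokens.length - index using Nat.strong_induction_on with fuel IH generalizing index
  intro const
  by_cases h : index < tokens.length
  · rw [List.drop_eq_getElem_cons h, fcLoopA, dif_pos h]
    simp only [fcAux]
    by_cases hq : PySem.Str.find tokens[index] "\"" ≠ -1
    · rw [if_pos hq, if_pos hq]
    · rw [if_neg hq, if_neg hq]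
      exact IH (tokens.length - (index + 1)) (by omega) (index + 1) (by omega) _
  · rw [fcLoopA, dif_neg h, List.drop_eq_nil_of_le (by omega)]
    simp only [fcAux]

theorem fcScanB_shift (rest : List String) : ∀ (j : Nat),
    fcScanB rest j = (fcScanB rest 0).map (fun x => (x.1 + j, x.2)) := by
  induction rest with
  | nil => intro j; simp only [fcScanB, Option.map_none]
  | cons t r ih =>
    intro j
    simp only [fcScanB]
    by_cases hq : PySem.Str.find t "\"" ≠ -1
    · rw [if_pos hq, if_pos hq]; simp only [Option.map_some, Nat.zero_add]
    · rw [if_neg hq, if_neg hq, ih (j + 1), ih 1, Option.map_map]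
      congr 1
      funext x
      simp only [Function.comp_apply]
      rw [Nat.add_assoc, Nat.add_comm 1 j]

theorem fcAux_spec : ∀ (rest : List String) (const : String) (i : Nat),
    fcAux rest const i =
      match fcScanB rest 0 with
      | none => ("error", (i : Int) + rest.length)
      | some (j, t, q) =>
        (const ++ midConcat (rest.take j) ++ " " ++ PySem.Str.slice t (some 0) (some (q + 1)),
         (i : Int) + j) := by
  intro rest
  induction rest with
  | nil => intro const i; simp only [fcAux, fcScanB, List.length_nil, Nat.cast_zero, Int.add_zero]
  | cons t r ih =>
    intro const i
    simp only [fcAux, fcScanB]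
    by_cases hq : PySem.Str.find t "\"" ≠ -1
    · rw [if_pos hq, if_pos hq]
      simp only [List.take_zero, midConcat, Nat.cast_zero, Int.add_zero]
      rw [String.append_empty]
    · rw [if_neg hq, if_neg hq, ih (const ++ " " ++ t) (i + 1), fcScanB_shift r 1]
      cases hsc : fcScanB r 0 with
      | none =>
        simp only [Option.map_none, List.length_cons]
        refine Prod.ext rfl ?_
        push_cast
        ring
      | some x =>
        obtain ⟨j, t', q⟩ := x
        simp only [Option.map_some, List.take_succ_cons, midConcat]
        refine Prod.ext ?_ ?_
        · simp only [String.append_assoc]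
        · simp only
          push_cast
          ring

theorem fcScanB_none_iff (rest : List String) :
    fcScanB rest 0 = none ↔ ∀ u ∈ rest, PySem.Str.find u "\"" = -1 := by
  induction rest with
  | nil => simp [fcScanB]
  | cons t r ih =>
    simp only [fcScanB]
    by_cases hq : PySem.Str.find t "\"" ≠ -1
    · rw [if_pos hq]
      constructor
      · intro h; exact absurd h (by simp)
      · intro h; exact absurd (h t (by simp)) hq
    · rw [if_neg hq, fcScanB_shift r 1]
      rw [Option.map_eq_none_iff, ih]
      constructor
      · intro h u hu
        rcases List.mem_cons.mp hu with rfl | hu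
        · by_contra hne; exact hq hne
        · exact h u hu
      · intro h u hu; exact h u (List.mem_cons_of_mem _ hu)

theorem fcScanB_some_decomp : ∀ (rest : List String) (j : Nat) (t : String) (q : Int),
    fcScanB rest 0 = some (j, t, q) →
    ∃ A B, rest = A ++ t :: B ∧ A.length = j ∧
      (∀ u ∈ A, PySem.Str.find u "\"" = -1) ∧ PySem.Str.find t "\"" = q ∧ q ≠ -1 := by
  intro rest
  induction rest with
  | nil => intro j t q h; simp [fcScanB] at h
  | cons u r ih =>
    intro j t q h
    simp only [fcScanB] at h
    by_cases hq : PySem.Str.find u "\"" ≠ -1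
    · rw [if_pos hq, Option.some_inj] at h
      have hj : 0 = j := congrArg Prod.fst h
      have ht : u = t := congrArg (fun x => x.2.1) h
      have hqq : PySem.Str.find u "\"" = q := congrArg (fun x => x.2.2) h
      refine ⟨[], r, by simp [← ht], by simp [← hj], by simp, by rw [← ht]; exact hqq, ?_⟩
      rw [← hqq]; exact hq
    · rw [if_neg hq, fcScanB_shift r 1] at h
      cases hsc : fcScanB r 0 with
      | none => rw [hsc] at h; simp at h
      | some x =>
        obtain ⟨j', t', q'⟩ := x
        rw [hsc] at h
        simp only [Option.map_some, Option.some_inj] at h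
        have hj : j' + 1 = j := congrArg Prod.fst h
        have ht : t' = t := congrArg (fun x => x.2.1) h
        have hqq : q' = q := congrArg (fun x => x.2.2) h
        obtain ⟨A, B, h1, h2, h3, h4, h5⟩ := ih j' t' q' hsc
        push_neg at hq
        refine ⟨u :: A, B, ?_, by simp [h2, hj], ?_, by rw [← ht, ← hqq]; exact h4,
          by rw [← hqq]; exact h5⟩
        · rw [List.cons_append, h1, ht]
        · intro v hv
          rcases List.mem_cons.mp hv with rfl | hv
          · exact hq
          · exact h3 v hv

-- singleton-pattern characterisations of Python's str.find, derived from the PySem spec lemmas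
theorem single_prefix_drop (c : Char) (l : List Char) (i : Nat) :
    ([c] <+: l.drop i) ↔ l[i]? = some c := by
  rw [← List.head?_drop]
  generalize l.drop i = z
  cases z with
  | nil => simp
  | cons a r => simp [List.cons_prefix_cons, eq_comm]

theorem find_char_eq_neg_one_iff (l : List Char) (c : Char) :
    PySem.Chars.find l [c] = -1 ↔ c ∉ l := by
  rw [PySem.Chars.find_eq_neg_one_iff, List.singleton_infix_iff]

theorem find_eq_of (l sub : List Char) (k : Nat)
    (h1 : sub <+: l.drop k) (h2 : ∀ i < k, ¬ sub <+: l.drop i) :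
    PySem.Chars.find l sub = (k : Int) := by
  have hinf : sub <:+: l := h1.isInfix.trans (l.drop_suffix k).isInfix
  have h0 : 0 ≤ PySem.Chars.find l sub := (PySem.Chars.find_nonneg_iff l sub).mpr hinf
  obtain ⟨hp, hmin⟩ := PySem.Chars.find_spec h0
  have : (PySem.Chars.find l sub).toNat = k := by
    rcases Nat.lt_trichotomy (PySem.Chars.find l sub).toNat k with h | h | h
    · exact absurd hp (h2 _ h)
    · exact h
    · exact absurd h1 (hmin k h)
  omega

theorem find_char_append_mem (u z : List Char) (c : Char) (hc : c ∈ u) :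
    PySem.Chars.find (u ++ z) [c] = PySem.Chars.find u [c] := by
  have h0 : 0 ≤ PySem.Chars.find u [c] :=
    (PySem.Chars.find_nonneg_iff u [c]).mpr (List.singleton_infix_iff c u |>.mpr hc)
  obtain ⟨hp, hmin⟩ := PySem.Chars.find_spec h0
  have hu : u[(PySem.Chars.find u [c]).toNat]? = some c := (single_prefix_drop c u _).mp hp
  have hlt : (PySem.Chars.find u [c]).toNat < u.length := by
    by_contra h
    rw [List.getElem?_eq_none (by omega)] at hu
    simp at hu
  rw [find_eq_of (u ++ z) [c] (PySem.Chars.find u [c]).toNat ?_ ?_]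
  · omega
  · rw [single_prefix_drop, List.getElem?_append_left hlt]; exact hu
  · intro i hi
    rw [single_prefix_drop, List.getElem?_append_left (by omega)]
    intro h
    exact hmin i hi ((single_prefix_drop c u i).mpr h)

theorem find_char_append_not_mem (u z : List Char) (c : Char) (hc : c ∉ u) :
    PySem.Chars.find (u ++ z) [c] =
      if PySem.Chars.find z [c] = -1 then -1 else (u.length : Int) + PySem.Chars.find z [c] := by
  by_cases hz : PySem.Chars.find z [c] = -1
  · rw [if_pos hz, find_char_eq_neg_one_iff]
    rw [find_char_eq_neg_one_iff] at hz
    simp [hc, hz]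
  · rw [if_neg hz]
    have h0 : 0 ≤ PySem.Chars.find z [c] := by
      have := PySem.Chars.neg_one_le_find z [c]; omega
    obtain ⟨hp, hmin⟩ := PySem.Chars.find_spec h0
    rw [find_eq_of (u ++ z) [c] (u.length + (PySem.Chars.find z [c]).toNat) ?_ ?_]
    · push_cast; omega
    · rw [single_prefix_drop, List.getElem?_append_right (by omega)]
      have : u.length + (PySem.Chars.find z [c]).toNat - u.length = (PySem.Chars.find z [c]).toNat := by omega
      rw [this]
      exact (single_prefix_drop c z _).mp hp
    · intro i hi
      rw [single_prefix_drop]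
      by_cases hiu : i < u.length
      · rw [List.getElem?_append_left hiu]
        intro h
        exact hc (List.mem_of_getElem? h)
      · rw [List.getElem?_append_right (by omega)]
        intro h
        exact hmin (i - u.length) (by omega) ((single_prefix_drop c z _).mpr h)

theorem mem_join_space (x : Char) : ∀ (l : List String),
    x ∈ PySem.Chars.join [' '] (l.map String.toList) → x = ' ' ∨ ∃ u ∈ l, x ∈ u.toList := by
  intro l
  induction l with
  | nil => intro h; simp [PySem.Chars.join_nil] at h
  | cons u r ih =>
    intro h
    cases r with
    | nil =>
      rw [List.map_cons, List.map_nil, PySem.Chars.join_singleton] at h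
      exact Or.inr ⟨u, by simp, h⟩
    | cons v r' =>
      rw [List.map_cons, List.map_cons, PySem.Chars.join_cons_cons] at h
      rcases List.mem_append.mp h with h' | h'
      · rcases List.mem_append.mp h' with h'' | h''
        · exact Or.inr ⟨u, by simp, h''⟩
        · exact Or.inl (by simpa using h'')
      · rcases ih h' with h'' | ⟨w, hw, hx⟩
        · exact Or.inl h''
        · exact Or.inr ⟨w, List.mem_cons_of_mem _ hw, hx⟩

theorem blob_find : ∀ (A : List String) (t : String) (B : List String),
    (∀ u ∈ A, '"' ∉ u.toList) → 0 ≤ PySem.Chars.find t.toList ['"'] →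
    PySem.Chars.find (PySem.Chars.join [' '] ((A ++ t :: B).map String.toList)) ['"']
      = (fcSizes A : Int) + PySem.Chars.find t.toList ['"'] := by
  intro A
  induction A with
  | nil =>
    intro t B _ ht
    cases B with
    | nil => simp [PySem.Chars.join_singleton, fcSizes]
    | cons b B' =>
      rw [List.nil_append, List.map_cons, List.map_cons, PySem.Chars.join_cons_cons,
        List.append_assoc,
        find_char_append_mem _ _ _ ((List.singleton_infix_iff _ _).mp
          ((PySem.Chars.find_nonneg_iff _ _).mp ht))]
      simp [fcSizes]
  | cons u A' ih =>
    intro t B hA ht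
    have hne : A' ++ t :: B ≠ [] := by simp
    cases hrest : A' ++ t :: B with
    | nil => exact absurd hrest hne
    | cons y r =>
      rw [List.cons_append, hrest, List.map_cons, List.map_cons, PySem.Chars.join_cons_cons,
        find_char_append_not_mem _ _ _ (by
          intro h
          rcases List.mem_append.mp h with h' | h'
          · exact hA u (by simp) h'
          · simp at h')]
      rw [← List.map_cons, ← hrest, ih t B (fun v hv => hA v (List.mem_cons_of_mem _ hv)) ht]
      rw [if_neg (by omega)]
      simp only [fcSizes, List.map_cons, List.sum_cons, List.length_append, List.length_cons,
        List.length_nil]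
      push_cast
      ring

theorem blob_take : ∀ (A : List String) (t : String) (B : List String) (qn : Nat),
    qn < t.toList.length →
    (' ' :: (PySem.Chars.join [' '] ((A ++ t :: B).map String.toList)).take (fcSizes A + qn + 1))
      = (midConcat A).toList ++ ' ' :: t.toList.take (qn + 1) := by
  intro A
  induction A with
  | nil =>
    intro t B qn hq
    have hbase : (PySem.Chars.join [' '] ((t :: B).map String.toList)).take (qn + 1)
        = t.toList.take (qn + 1) := by
      cases B with
      | nil => simp [PySem.Chars.join_singleton]
      | cons b B' =>
        rw [List.map_cons, List.map_cons, PySem.Chars.join_cons_cons, List.append_assoc,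
          List.take_append_of_le_length (by omega)]
    have h0 : fcSizes [] + qn + 1 = qn + 1 := by simp [fcSizes]
    rw [List.nil_append, h0, hbase]
    simp [midConcat]
  | cons u A' ih =>
    intro t B qn hq
    have hne : A' ++ t :: B ≠ [] := by simp
    cases hrest : A' ++ t :: B with
    | nil => exact absurd hrest hne
    | cons y r =>
      have hmaps : PySem.Chars.join [' '] (y.toList :: List.map String.toList r)
          = PySem.Chars.join [' '] (List.map String.toList (A' ++ t :: B)) := by
        rw [hrest, List.map_cons]
      rw [List.cons_append, hrest, List.map_cons, List.map_cons, PySem.Chars.join_cons_cons,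
        hmaps]
      have hlen : fcSizes (u :: A') + qn + 1
          = (u.toList ++ [' ']).length + (fcSizes A' + qn + 1) := by
        rw [fcSizes_cons, List.length_append]
        simp
        omega
      rw [hlen, List.take_length_add_append]
      have hrec := ih t B qn hq
      have hsp : (" " : String).toList = [' '] := rfl
      simp only [midConcat, String.toList_append, hsp]
      rw [List.append_assoc, List.append_assoc, ← hrec]
      simp
theorem fcLocB_spec (tokens : List String) : ∀ (A : List String) (j : Nat) (acc : Int)
    (t : String) (B : List String) (qn : Nat),
    tokens.drop j = A ++ t :: B → qn < t.toList.length →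
    fcLocB tokens (acc + (fcSizes A : Int) + qn) j acc = (j : Int) + A.length := by
  intro A
  induction A with
  | nil =>
    intro j acc t B qn hdrop hq
    have hj : j < tokens.length := List.length_lt_of_drop_ne_nil (by rw [hdrop]; simp)
    have h0 : tokens[j]? = some t := by
      have h1 : (List.drop j tokens)[0]? = tokens[j + 0]? := List.getElem?_drop
      rw [hdrop] at h1
      simpa using h1.symm
    have htok : tokens[j] = t := by
      rw [List.getElem?_eq_getElem hj] at h0
      exact Option.some_inj.mp h0
    rw [fcLocB, dif_pos hj, htok, if_neg (by rw [PySem.Str.len_eq, fcSizes_nil]; push_cast; omega)]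
    simp
  | cons u A' ih =>
    intro j acc t B qn hdrop hq
    have hj : j < tokens.length := List.length_lt_of_drop_ne_nil (by rw [hdrop]; simp)
    have h0 : tokens[j]? = some u := by
      have h1 : (List.drop j tokens)[0]? = tokens[j + 0]? := List.getElem?_drop
      rw [hdrop] at h1
      simpa using h1.symm
    have htok : tokens[j] = u := by
      rw [List.getElem?_eq_getElem hj] at h0
      exact Option.some_inj.mp h0
    have hdrop' : tokens.drop (j + 1) = A' ++ t :: B := by
      rw [← List.tail_drop, hdrop]; simp
    have hsz : acc + (fcSizes (u :: A') : Int) + qn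
        = (acc + PySem.Str.len u + 1) + (fcSizes A' : Int) + qn := by
      rw [PySem.Str.len_eq, fcSizes_cons]; push_cast; ring
    rw [fcLocB, dif_pos hj, htok,
      if_pos (by rw [PySem.Str.len_eq, fcSizes_cons]; push_cast; omega)]
    rw [hsz, ih (j + 1) (acc + PySem.Str.len u + 1) t B qn hdrop' hq]
    simp only [List.length_cons]
    push_cast
    ring

-- ===== VERDICT (by name: the statement is the Claim_ definition above) =====
theorem find_constant_spec : Claim_equal_find_constant := by
  intro tokens token hdom hpre
  unfold Spec_find_constant find_constant find_constant_alt
  cases hidx : PySem.List.index? tokens token with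
  | none => exact absurd hpre ((PySem.List.index?_eq_none_iff _ _).mp hidx)
  | some i =>
    obtain ⟨hi, -, -⟩ := PySem.List.getElem_of_index?_eq_some hidx
    simp only
    rw [PySem.List.slice_from_natCast]
    rw [fcLoopA_eq_aux, fcAux_spec]
    have hblob : (PySem.Str.join " " (tokens.drop (i + 1))).toList
        = PySem.Chars.join [' '] ((tokens.drop (i + 1)).map String.toList) := by
      rw [PySem.Str.toList_join]; rfl
    cases hsc : fcScanB (tokens.drop (i + 1)) 0 with
    | none =>
      have hfree := (fcScanB_none_iff _).mp hsc
      have hfind : PySem.Str.find (PySem.Str.join " " (tokens.drop (i + 1))) "\"" = -1 := by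
        rw [PySem.Str.find_eq, hblob]
        have : ("\"" : String).toList = ['"'] := rfl
        rw [this, find_char_eq_neg_one_iff]
        intro hmem
        rcases mem_join_space _ _ hmem with h | ⟨u, hu, hq⟩
        · exact absurd h (by decide)
        · have := hfree u hu
          rw [PySem.Str.find_eq] at this
          have h2 : ("\"" : String).toList = ['"'] := rfl
          rw [h2, find_char_eq_neg_one_iff] at this
          exact this hq
      rw [if_pos hfind]
      simp only
      refine Prod.ext rfl ?_
      simp only [List.length_drop]
      push_cast
      omega
    | some x =>
      obtain ⟨j, t, q⟩ := x
      obtain ⟨A, B, hdecomp, hlenA, hAfree, hqt, hqne⟩ := fcScanB_some_decomp _ _ _ _ hsc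
      have hq0 : 0 ≤ q := by
        have h := PySem.Chars.neg_one_le_find t.toList ("\"" : String).toList
        rw [← PySem.Str.find_eq, hqt] at h
        omega
      have hqchars : PySem.Chars.find t.toList ['"'] = q := by
        have : ("\"" : String).toList = ['"'] := rfl
        rw [← this, ← PySem.Str.find_eq]; exact hqt
      have hqlt : q.toNat < t.toList.length := by
        obtain ⟨hp, -⟩ := PySem.Chars.find_spec (by rw [hqchars]; exact hq0 :
          0 ≤ PySem.Chars.find t.toList ['"'])
        rw [hqchars] at hp
        rw [single_prefix_drop] at hp
        exact (List.getElem?_eq_some_iff.mp hp).1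
      have hAfree' : ∀ u ∈ A, '"' ∉ u.toList := by
        intro u hu
        have := hAfree u hu
        rw [PySem.Str.find_eq] at this
        have h2 : ("\"" : String).toList = ['"'] := rfl
        rw [h2, find_char_eq_neg_one_iff] at this
        exact this
      have hfind : PySem.Str.find (PySem.Str.join " " (tokens.drop (i + 1))) "\""
          = (fcSizes A : Int) + q := by
        rw [PySem.Str.find_eq, hblob]
        have h2 : ("\"" : String).toList = ['"'] := rfl
        rw [h2, hdecomp, blob_find A t B hAfree' (by rw [hqchars]; exact hq0), hqchars]
      rw [hfind, if_neg (by omega)]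
      have htake : q.toNat + 1 = (q + 1).toNat := by omega
      refine Prod.ext ?_ ?_
      · -- string components
        simp only
        apply String.toList_inj.mp
        simp only [String.toList_append]
        have hsl : (PySem.Str.slice (PySem.Str.join " " (tokens.drop (i + 1))) (some 0)
            (some ((fcSizes A : Int) + q + 1))).toList
            = (PySem.Chars.join [' '] ((A ++ t :: B).map String.toList)).take (fcSizes A + q.toNat + 1) := by
          rw [PySem.Str.toList_slice, PySem.Chars.slice_eq_listSlice, hblob, hdecomp]
          rw [PySem.List.slice_toNat _ (by omega) (by omega)]
          simp only [Int.toNat_zero, List.drop_zero, Nat.sub_zero]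
          congr 1
          omega
        rw [hsl]
        have hsl2 : (PySem.Str.slice t (some 0) (some (q + 1))).toList
            = t.toList.take (q.toNat + 1) := by
          rw [PySem.Str.toList_slice, PySem.Chars.slice_eq_listSlice]
          rw [PySem.List.slice_toNat _ (by omega) (by omega)]
          simp only [Int.toNat_zero, List.drop_zero, Nat.sub_zero]
          congr 1
          omega
        rw [hsl2]
        have htk : (tokens.drop (i + 1)).take j = A := by
          rw [hdecomp, ← hlenA, List.take_left]
        rw [htk]
        have hbt := blob_take A t B q.toNat hqlt
        have hsp : (" " : String).toList = [' '] := rfl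
        simp only [hsp, List.append_assoc, List.singleton_append]
        rw [hbt]
      · -- index components
        simp only
        have hdrop : tokens.drop (i + 1) = A ++ t :: B := hdecomp
        have := fcLocB_spec tokens A (i + 1) 0 t B q.toNat hdrop hqlt
        have harg : (0 : Int) + (fcSizes A : Int) + q.toNat = (fcSizes A : Int) + q := by omega
        rw [harg] at this
        rw [this, hlenA]
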